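-- pv_equiv track=rewrite | github.com/eguefif/aoc2024 | python/day8.py | count_sym
-- ===== SOURCE A (Python) =====
-- def count_sym(grid):
--     syms = set()
--     acc = 0
--     for row in grid:
--         for sym in row:
--             if sym != ".":
--                 if sym in syms:
--                     acc += 1
--                 else:
--                     syms.add(sym)
--
--     return acc + len(syms)
-- ===== SOURCE B (Python) =====
-- def count_sym(grid):
--     return sum(1 for row in grid for c in row if c != ".")
-- ===== Notes on version B (the rewrite author's own statement) =====
-- stated objective: simpler
-- what changed: B drops A's seen-set and the seen/unseen branch entirely, relying on the identity acc + len(syms) = number of non-dot cells, and just counts non-dot characters in one comprehension.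
import Mathlib
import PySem

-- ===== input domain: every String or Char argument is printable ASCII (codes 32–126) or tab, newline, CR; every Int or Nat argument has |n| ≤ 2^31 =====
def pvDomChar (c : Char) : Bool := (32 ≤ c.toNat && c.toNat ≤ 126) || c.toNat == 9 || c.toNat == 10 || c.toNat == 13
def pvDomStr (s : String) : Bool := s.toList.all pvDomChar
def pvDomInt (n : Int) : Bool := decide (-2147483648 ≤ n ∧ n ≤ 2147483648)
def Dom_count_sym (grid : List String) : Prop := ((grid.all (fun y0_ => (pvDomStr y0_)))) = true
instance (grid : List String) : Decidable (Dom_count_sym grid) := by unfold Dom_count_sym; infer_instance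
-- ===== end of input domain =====

-- B counts non-dot characters directly, without A's seen-set and seen/unseen branch (objective: simpler).

-- ===== PORT A =====
-- one step of A's inner loop body, over the state (syms, acc)
def countSymStepA (st : PySem.Set Char × Int) (sym : Char) : PySem.Set Char × Int :=
  if sym ≠ '.' then
    if PySem.Set.contains st.1 sym then (st.1, st.2 + 1)
    else (PySem.Set.add st.1 sym, st.2)
  else st

def count_sym (grid : List String) : Int :=
  let st := grid.foldl (fun st row => row.toList.foldl countSymStepA st) (PySem.Set.empty, 0)
  st.2 + PySem.Set.len st.1

-- ===== PORT B =====
-- one step of B's generator sum: +1 for each non-dot character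
def countSymStepB (a : Int) (c : Char) : Int :=
  if c ≠ '.' then a + 1 else a

def count_sym_alt (grid : List String) : Int :=
  grid.foldl (fun a row => row.toList.foldl countSymStepB a) 0

-- ===== PRECONDITION & SPEC =====
def Spec_count_sym (grid : List String) (out : Int) : Prop := out = count_sym_alt grid
instance (grid : List String) (out : Int) : Decidable (Spec_count_sym grid out) := by unfold Spec_count_sym; infer_instance

-- ===== CLAIM (what is proved, stated in full; the proofs are below) =====
def Claim_equal_count_sym : Prop := ∀ (grid : List String), Dom_count_sym grid → Spec_count_sym grid (count_sym grid)

-- ===== LEMMAS AND PROOFS =====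

-- every non-dot char increases acc + |syms| by exactly one, whether it is fresh or repeated
theorem countSym_inner (l : List Char) : ∀ st : PySem.Set Char × Int,
    (l.foldl countSymStepA st).2 + ((l.foldl countSymStepA st).1.length : Int)
      = l.foldl countSymStepB (st.2 + (st.1.length : Int)) := by
  induction l with
  | nil => intro st; simp
  | cons c l ih =>
    intro st
    rw [List.foldl_cons, List.foldl_cons, ih]
    congr 1
    by_cases hc : c = '.'
    · simp [countSymStepA, countSymStepB, hc]
    · by_cases hm : c ∈ st.1
      · simp [countSymStepA, countSymStepB, hc, hm]; ring
      · simp [countSymStepA, countSymStepB, PySem.Set.add, hc, hm]; ring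

theorem countSym_outer (g : List String) : ∀ st : PySem.Set Char × Int,
    (g.foldl (fun st row => row.toList.foldl countSymStepA st) st).2
      + ((g.foldl (fun st row => row.toList.foldl countSymStepA st) st).1.length : Int)
      = g.foldl (fun a row => row.toList.foldl countSymStepB a) (st.2 + (st.1.length : Int)) := by
  induction g with
  | nil => intro st; simp
  | cons r g ih =>
    intro st
    rw [List.foldl_cons, List.foldl_cons, ih, countSym_inner]

-- ===== VERDICT (by name: the statement is the Claim_ definition above) =====
theorem count_sym_spec : Claim_equal_count_sym := by
  intro grid _
  show count_sym grid = count_sym_alt grid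
  have h := countSym_outer grid (PySem.Set.empty, 0)
  simpa [count_sym, count_sym_alt, PySem.Set.len, PySem.Set.empty] using h
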